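-- pv_equiv track=rewrite | github.com/icosac/aoc2021 | day4/prova.py | get_strike_numbers
-- ===== SOURCE A (Python) =====
-- def get_arr_len(arr: list):
--     arr_len = 0
--     for _ in arr:
--         arr_len += 1
--     return arr_len
--
-- def get_strike_numbers(bool_board: list, bingo_board: list):
--
--     strike_index = { 'col': {0:[], 1:[] }, 'row': {0:[], 1:[]}  }
--
--     row = 0
--     # for each row
--     board_dimension = get_arr_len(bingo_board)
--     while row < board_dimension:
--         row_idx = []
--         col_idx = []
--         vertical = 0
--         horizontal = 0
--         col = 0
--         # for each column
--         while col < board_dimension: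
--             vertical += bool_board[col][row]
--             horizontal += bool_board[row][col]
--             row_idx.append(bingo_board[row][col])
--             col_idx.append(bingo_board[col][row])
--             col += 1
--
--         vertical_found = vertical == board_dimension
--         horizontal_found = horizontal == board_dimension
--         strike_index['row'][horizontal_found] = row_idx
--         strike_index['col'][vertical_found] = col_idx
--
--         row += 1
--
--     # only one will have values, the other will be empty
--     strike_numbers = []
--     for axis in strike_index:
--         for number in strike_index[axis][1]:
--             strike_numbers.append(number)
--
--     return strike_numbers
-- ===== SOURCE B (Python) =====
-- def get_strike_numbers(bool_board: list, bingo_board: list):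
--     n = len(bingo_board)
--
--     def transpose(m):
--         return [[m[c][r] for c in range(n)] for r in range(n)]
--
--     def last_full_row(marks, values):
--         win = []
--         for mrow, vrow in zip(marks, values):
--             if sum(mrow[:n]) == n:
--                 win = vrow[:n]
--         return win
--
--     return (last_full_row(transpose(bool_board), transpose(bingo_board))
--             + last_full_row(bool_board, bingo_board))
-- ===== Notes on version B (the rewrite author's own statement) =====
-- stated objective: simpler
-- what changed: A's single dual-index pass with manual row/column counters, append-built index lists and a dict whose True/False slots are overwritten is replaced by a transpose plus one generic 'last fully-marked row' scan applied twice (columns via the transposed boards, then rows via zip), concatenated column-part first.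
import Mathlib
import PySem

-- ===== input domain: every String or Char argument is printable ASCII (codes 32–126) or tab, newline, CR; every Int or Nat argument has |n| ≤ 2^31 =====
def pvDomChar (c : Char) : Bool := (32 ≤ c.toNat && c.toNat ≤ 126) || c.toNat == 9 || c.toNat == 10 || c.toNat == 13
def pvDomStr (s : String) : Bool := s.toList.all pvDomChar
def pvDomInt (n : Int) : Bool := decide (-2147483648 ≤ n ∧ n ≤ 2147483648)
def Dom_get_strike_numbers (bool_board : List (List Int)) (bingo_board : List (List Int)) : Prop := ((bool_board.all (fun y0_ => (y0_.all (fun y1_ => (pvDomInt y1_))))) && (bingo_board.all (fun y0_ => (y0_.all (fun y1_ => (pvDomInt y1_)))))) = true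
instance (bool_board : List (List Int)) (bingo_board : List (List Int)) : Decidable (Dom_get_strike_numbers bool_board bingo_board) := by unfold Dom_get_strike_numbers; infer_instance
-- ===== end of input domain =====

-- B replaces A's single dual-index pass (manual counters + dict overwrite) with a transpose plus
-- one generic "last fully-marked row" scan applied twice; objective: simpler, same cost.

-- ===== PORT A =====
def get_arr_len (arr : List (List Int)) : Int :=
  arr.foldl (fun arr_len _ => arr_len + 1) 0

-- strike_index = {'col': {0:[],1:[]}, 'row': {0:[],1:[]}} has fixed literal keys, so it is
-- represented as the 4-tuple (col0, col1, row0, row1); the bool keys index 1/0 as in Python.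
-- xs[i] on the nonnegative indices used here is PySem.List.pyGetD (in range, hence exact, under Pre_).
def get_strike_numbers (bool_board : List (List Int)) (bingo_board : List (List Int)) : List Int :=
  let board_dimension := get_arr_len bingo_board
  let st :=
    (PySem.List.pyRange 0 board_dimension 1).foldl (fun st row =>
      let inner :=
        (PySem.List.pyRange 0 board_dimension 1).foldl (fun acc col =>
          (acc.1 + PySem.List.pyGetD (PySem.List.pyGetD bool_board col []) row 0,
           acc.2.1 + PySem.List.pyGetD (PySem.List.pyGetD bool_board row []) col 0,
           acc.2.2.1 ++ [PySem.List.pyGetD (PySem.List.pyGetD bingo_board row []) col 0],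
           acc.2.2.2 ++ [PySem.List.pyGetD (PySem.List.pyGetD bingo_board col []) row 0]))
          ((0 : Int), (0 : Int), ([] : List Int), ([] : List Int))
      let vertical_found := inner.1 = board_dimension
      let horizontal_found := inner.2.1 = board_dimension
      -- strike_index['row'][horizontal_found] = row_idx
      let st1 := if horizontal_found then (st.1, st.2.1, st.2.2.1, inner.2.2.1)
                 else (st.1, st.2.1, inner.2.2.1, st.2.2.2)
      -- strike_index['col'][vertical_found] = col_idx
      if vertical_found then (st1.1, inner.2.2.2, st1.2.2.1, st1.2.2.2)
      else (inner.2.2.2, st1.2.1, st1.2.2.1, st1.2.2.2))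
      (([] : List Int), ([] : List Int), ([] : List Int), ([] : List Int))
  -- for axis in strike_index: for number in strike_index[axis][1]: strike_numbers.append(number)
  let strike_numbers := st.2.1.foldl (fun acc number => acc ++ [number]) ([] : List Int)
  st.2.2.2.foldl (fun acc number => acc ++ [number]) strike_numbers

-- ===== PORT B =====
-- mrow[:n] / vrow[:n] with n = len(bingo_board) (a nonnegative bound) is List.take n (exact there)
def get_strike_numbers_alt (bool_board : List (List Int)) (bingo_board : List (List Int)) : List Int :=
  let n := bingo_board.length
  let transpose := fun (m : List (List Int)) =>
    (PySem.List.pyRange 0 (n : Int) 1).map (fun r =>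
      (PySem.List.pyRange 0 (n : Int) 1).map (fun c =>
        PySem.List.pyGetD (PySem.List.pyGetD m c []) r 0))
  let lastFullRow := fun (marks values : List (List Int)) =>
    (marks.zip values).foldl (fun win mv =>
      if (mv.1.take n).sum = (n : Int) then mv.2.take n else win) ([] : List Int)
  lastFullRow (transpose bool_board) (transpose bingo_board) ++ lastFullRow bool_board bingo_board

-- ===== PRECONDITION & SPEC =====
-- Pre_ excludes exactly the inputs where A raises IndexError: it reads bool_board[i][j] and
-- bingo_board[i][j] for all i, j < len(bingo_board), so the first len(bingo_board) rows of
-- bool_board and every row of bingo_board must have at least len(bingo_board) entries.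
def Pre_get_strike_numbers (bool_board : List (List Int)) (bingo_board : List (List Int)) : Prop :=
  bingo_board.length ≤ bool_board.length ∧
  (∀ r ∈ bool_board.take bingo_board.length, bingo_board.length ≤ r.length) ∧
  (∀ r ∈ bingo_board, bingo_board.length ≤ r.length)
instance (bool_board : List (List Int)) (bingo_board : List (List Int)) : Decidable (Pre_get_strike_numbers bool_board bingo_board) := by unfold Pre_get_strike_numbers; infer_instance

def pvWitness_get_strike_numbers : List (List Int) × List (List Int) := ([[1, 0], [0, 1]], [[5, 6], [7, 8]])

def Spec_get_strike_numbers (bool_board : List (List Int)) (bingo_board : List (List Int)) (out : List Int) : Prop := out = get_strike_numbers_alt bool_board bingo_board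
instance (bool_board : List (List Int)) (bingo_board : List (List Int)) (out : List Int) : Decidable (Spec_get_strike_numbers bool_board bingo_board out) := by unfold Spec_get_strike_numbers; infer_instance

-- ===== CLAIM (what is proved, stated in full; the proofs are below) =====
def Claim_equal_get_strike_numbers : Prop := ∀ (bool_board : List (List Int)) (bingo_board : List (List Int)), Dom_get_strike_numbers bool_board bingo_board → Pre_get_strike_numbers bool_board bingo_board → Spec_get_strike_numbers bool_board bingo_board (get_strike_numbers bool_board bingo_board)

-- ===== LEMMAS AND PROOFS =====

theorem count_aux (arr : List (List Int)) (i : Int) : arr.foldl (fun l _ => l + 1) i = i + arr.length := by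
  induction arr generalizing i with
  | nil => simp
  | cons x t ih => simp [ih]; omega

theorem get_arr_len_eq (arr : List (List Int)) : get_arr_len arr = (arr.length : Int) := by
  simp [get_arr_len, count_aux]

theorem foldl4 {ι : Type} (L : List ι) (f1 f2 f3 f4 : ι → Int) (a b : Int) (u v : List Int) :
    L.foldl (fun acc x => (acc.1 + f1 x, acc.2.1 + f2 x, acc.2.2.1 ++ [f3 x], acc.2.2.2 ++ [f4 x])) (a, b, u, v)
    = (a + (L.map f1).sum, b + (L.map f2).sum, u ++ L.map f3, v ++ L.map f4) := by
  induction L generalizing a b u v with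
  | nil => simp
  | cons x t ih => simp [ih, add_assoc]

theorem zip_eq_map_range {α β : Type} (xs : List α) (ys : List β) (dx : α) (dy : β) (h : ys.length ≤ xs.length) :
    xs.zip ys = (List.range ys.length).map (fun i => (xs.getD i dx, ys.getD i dy)) := by
  apply List.ext_getElem
  · simp [Nat.min_eq_right h]
  · intro i h1 h2
    simp at h2
    simp [List.getElem_zip, List.getD_eq_getElem?_getD, h2, Nat.lt_of_lt_of_le h2 h]

theorem take_eq_map_range (r : List Int) (n : Nat) (h : n ≤ r.length) :
    r.take n = (List.range n).map (fun c => r.getD c 0) := by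
  apply List.ext_getElem
  · simp [Nat.min_eq_left h]
  · intro i h1 h2
    simp at h1
    simp [List.getD_eq_getElem?_getD, List.getElem?_eq_getElem h1.2]

-- the Int-index row/col extracts both ports boil down to
def pvRowIdx (m : List (List Int)) (bd row : Int) : List Int :=
  (PySem.List.pyRange 0 bd 1).map (fun col => PySem.List.pyGetD (PySem.List.pyGetD m row []) col 0)
def pvColIdx (m : List (List Int)) (bd row : Int) : List Int :=
  (PySem.List.pyRange 0 bd 1).map (fun col => PySem.List.pyGetD (PySem.List.pyGetD m col []) row 0)

theorem A_inner (bb gb : List (List Int)) (bd row : Int) :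
    (PySem.List.pyRange 0 bd 1).foldl (fun acc col =>
          (acc.1 + PySem.List.pyGetD (PySem.List.pyGetD bb col []) row 0,
           acc.2.1 + PySem.List.pyGetD (PySem.List.pyGetD bb row []) col 0,
           acc.2.2.1 ++ [PySem.List.pyGetD (PySem.List.pyGetD gb row []) col 0],
           acc.2.2.2 ++ [PySem.List.pyGetD (PySem.List.pyGetD gb col []) row 0]))
          ((0 : Int), (0 : Int), ([] : List Int), ([] : List Int))
    = ((pvColIdx bb bd row).sum, (pvRowIdx bb bd row).sum, pvRowIdx gb bd row, pvColIdx gb bd row) := by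
  simp [foldl4, pvRowIdx, pvColIdx]

theorem A_outer_col (bb gb : List (List Int)) (bd : Int) (L : List Int)
    (s : List Int × List Int × List Int × List Int) :
    (L.foldl (fun st row =>
      let inner :=
        (PySem.List.pyRange 0 bd 1).foldl (fun acc col =>
          (acc.1 + PySem.List.pyGetD (PySem.List.pyGetD bb col []) row 0,
           acc.2.1 + PySem.List.pyGetD (PySem.List.pyGetD bb row []) col 0,
           acc.2.2.1 ++ [PySem.List.pyGetD (PySem.List.pyGetD gb row []) col 0],
           acc.2.2.2 ++ [PySem.List.pyGetD (PySem.List.pyGetD gb col []) row 0]))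
          ((0 : Int), (0 : Int), ([] : List Int), ([] : List Int))
      let vertical_found := inner.1 = bd
      let horizontal_found := inner.2.1 = bd
      let st1 := if horizontal_found then (st.1, st.2.1, st.2.2.1, inner.2.2.1)
                 else (st.1, st.2.1, inner.2.2.1, st.2.2.2)
      if vertical_found then (st1.1, inner.2.2.2, st1.2.2.1, st1.2.2.2)
      else (inner.2.2.2, st1.2.1, st1.2.2.1, st1.2.2.2)) s).2.1
    = L.foldl (fun w row => if (pvColIdx bb bd row).sum = bd then pvColIdx gb bd row else w) s.2.1 := by
  induction L generalizing s with
  | nil => rfl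
  | cons x t ih =>
    rw [List.foldl_cons, List.foldl_cons, ih]
    congr 1
    simp only [A_inner]
    by_cases h1 : (pvColIdx bb bd x).sum = bd <;> by_cases h2 : (pvRowIdx bb bd x).sum = bd <;>
      simp [h1, h2]

theorem A_outer_row (bb gb : List (List Int)) (bd : Int) (L : List Int)
    (s : List Int × List Int × List Int × List Int) :
    (L.foldl (fun st row =>
      let inner :=
        (PySem.List.pyRange 0 bd 1).foldl (fun acc col =>
          (acc.1 + PySem.List.pyGetD (PySem.List.pyGetD bb col []) row 0,
           acc.2.1 + PySem.List.pyGetD (PySem.List.pyGetD bb row []) col 0,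
           acc.2.2.1 ++ [PySem.List.pyGetD (PySem.List.pyGetD gb row []) col 0],
           acc.2.2.2 ++ [PySem.List.pyGetD (PySem.List.pyGetD gb col []) row 0]))
          ((0 : Int), (0 : Int), ([] : List Int), ([] : List Int))
      let vertical_found := inner.1 = bd
      let horizontal_found := inner.2.1 = bd
      let st1 := if horizontal_found then (st.1, st.2.1, st.2.2.1, inner.2.2.1)
                 else (st.1, st.2.1, inner.2.2.1, st.2.2.2)
      if vertical_found then (st1.1, inner.2.2.2, st1.2.2.1, st1.2.2.2)
      else (inner.2.2.2, st1.2.1, st1.2.2.1, st1.2.2.2)) s).2.2.2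
    = L.foldl (fun w row => if (pvRowIdx bb bd row).sum = bd then pvRowIdx gb bd row else w) s.2.2.2 := by
  induction L generalizing s with
  | nil => rfl
  | cons x t ih =>
    rw [List.foldl_cons, List.foldl_cons, ih]
    congr 1
    simp only [A_inner]
    by_cases h1 : (pvColIdx bb bd x).sum = bd <;> by_cases h2 : (pvRowIdx bb bd x).sum = bd <;>
      simp [h1, h2]

theorem A_eq (bb gb : List (List Int)) :
    get_strike_numbers bb gb =
      (PySem.List.pyRange 0 (gb.length : Int) 1).foldl
        (fun w row => if (pvColIdx bb (gb.length : Int) row).sum = (gb.length : Int) then pvColIdx gb (gb.length : Int) row else w) []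
      ++ (PySem.List.pyRange 0 (gb.length : Int) 1).foldl
        (fun w row => if (pvRowIdx bb (gb.length : Int) row).sum = (gb.length : Int) then pvRowIdx gb (gb.length : Int) row else w) [] := by
  simp only [get_strike_numbers, get_arr_len_eq, PySem.List.foldl_append_singleton,
    A_outer_col, A_outer_row, List.nil_append]

theorem pvRowIdx_take (m : List (List Int)) (n i : Nat) (h : n ≤ (m.getD i []).length) :
    pvRowIdx m (n : Int) (i : Int) = (m.getD i []).take n := by
  rw [pvRowIdx, PySem.List.pyRange_zero_natCast, take_eq_map_range _ _ h, List.map_map]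
  simp

theorem B_col (bb gb : List (List Int)) (n : Nat) :
    (((PySem.List.pyRange 0 (n : Int) 1).map (fun r =>
      (PySem.List.pyRange 0 (n : Int) 1).map (fun c =>
        PySem.List.pyGetD (PySem.List.pyGetD bb c []) r 0))).zip
     ((PySem.List.pyRange 0 (n : Int) 1).map (fun r =>
      (PySem.List.pyRange 0 (n : Int) 1).map (fun c =>
        PySem.List.pyGetD (PySem.List.pyGetD gb c []) r 0)))).foldl
      (fun win mv => if (mv.1.take n).sum = (n : Int) then mv.2.take n else win) []
    = (PySem.List.pyRange 0 (n : Int) 1).foldl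
        (fun w row => if (pvColIdx bb (n : Int) row).sum = (n : Int) then pvColIdx gb (n : Int) row else w) [] := by
  rw [List.zip_map', List.foldl_map]
  apply List.foldl_ext
  intro w r hr
  have hlen : ∀ (m : List (List Int)),
      ((PySem.List.pyRange 0 (n : Int) 1).map (fun c =>
        PySem.List.pyGetD (PySem.List.pyGetD m c []) r 0)).length = n := by
    intro m; simp [PySem.List.length_pyRange_one]
  rw [List.take_of_length_le (le_of_eq (hlen bb)), List.take_of_length_le (le_of_eq (hlen gb))]
  rfl

theorem B_row (bb gb : List (List Int)) (hlen : gb.length ≤ bb.length)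
    (hbb : ∀ r ∈ bb.take gb.length, gb.length ≤ r.length)
    (hgb : ∀ r ∈ gb, gb.length ≤ r.length) :
    (bb.zip gb).foldl
      (fun win mv => if (mv.1.take gb.length).sum = (gb.length : Int) then mv.2.take gb.length else win) []
    = (PySem.List.pyRange 0 (gb.length : Int) 1).foldl
        (fun w row => if (pvRowIdx bb (gb.length : Int) row).sum = (gb.length : Int) then pvRowIdx gb (gb.length : Int) row else w) [] := by
  rw [zip_eq_map_range bb gb [] [] hlen, List.foldl_map, PySem.List.pyRange_zero_natCast, List.foldl_map]
  apply List.foldl_ext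
  intro w i hi
  simp only [List.mem_range] at hi
  have hib : i < bb.length := lt_of_lt_of_le hi hlen
  have h1 : gb.length ≤ (bb.getD i []).length := by
    apply hbb
    rw [List.getD_eq_getElem _ _ hib]
    have : bb[i] = (bb.take gb.length)[i]'(by simp [hi, hib]) := by
      simp [List.getElem_take]
    rw [this]
    exact List.getElem_mem _
  have h2 : gb.length ≤ (gb.getD i []).length := by
    apply hgb
    rw [List.getD_eq_getElem _ _ hi]
    exact List.getElem_mem _
  rw [pvRowIdx_take bb _ _ h1, pvRowIdx_take gb _ _ h2]

-- ===== VERDICT (by name: the statement is the Claim_ definition above) =====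
theorem get_strike_numbers_spec : Claim_equal_get_strike_numbers := by
  intro bb gb _ h
  unfold Spec_get_strike_numbers
  rw [A_eq]
  simp only [get_strike_numbers_alt]
  rw [B_col, B_row bb gb h.1 h.2.1 h.2.2]
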